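-- pv_equiv track=rewrite | github.com/kh3dron/cta | mvp.py | get_state_winner
-- ===== SOURCE A (Python) =====
-- def get_state_winner(data, state):
--     state_results = data.get(state, {})
--     votes = {}
--     for county in state_results:
--         for party in state_results[county]:
--             for candidate in state_results[county][party]:
--                 if candidate in votes:
--                     votes[candidate] += state_results[county][party][candidate]
--                 else:
--                     votes[candidate] = state_results[county][party][candidate]
--
--     winner = max(votes, key=votes.get)
--     if list(votes.values()).count(votes[winner]) > 1:
--         return "Tie between " + ", ".join([candidate for candidate in votes if votes[candidate] == votes[winner]])
--     return winner
-- ===== SOURCE B (Python) =====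
-- def get_state_winner(data, state):
--     # flatten the state's nested dicts into one stream of (candidate, n) pairs
--     pairs = []
--     for parties in data.get(state, {}).values():
--         for cands in parties.values():
--             pairs.extend(cands.items())
--     # candidates in first-appearance order, no dict: per-candidate filtered sums
--     order = []
--     for cand, _ in pairs:
--         if cand not in order:
--             order.append(cand)
--     if not order:
--         raise ValueError("no votes recorded for this state")
--     totals = [sum(n for c, n in pairs if c == cand) for cand in order]
--     top = max(totals)
--     tied = [cand for cand, t in zip(order, totals) if t == top]
--     return tied[0] if len(tied) == 1 else "Tie between " + ", ".join(tied)
-- ===== Notes on version B (the rewrite author's own statement) =====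
-- stated objective: alternative
-- what changed: B drops A's incrementally-mutated votes dict and its max-then-count-then-filter winner logic entirely: it flattens the state into a (candidate, n) pair stream, builds the first-appearance candidate order list, computes each candidate's total as an independent filtered sum over the stream, takes max of that totals list, and selects the tied candidates by zipping order with totals.
import Mathlib
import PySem

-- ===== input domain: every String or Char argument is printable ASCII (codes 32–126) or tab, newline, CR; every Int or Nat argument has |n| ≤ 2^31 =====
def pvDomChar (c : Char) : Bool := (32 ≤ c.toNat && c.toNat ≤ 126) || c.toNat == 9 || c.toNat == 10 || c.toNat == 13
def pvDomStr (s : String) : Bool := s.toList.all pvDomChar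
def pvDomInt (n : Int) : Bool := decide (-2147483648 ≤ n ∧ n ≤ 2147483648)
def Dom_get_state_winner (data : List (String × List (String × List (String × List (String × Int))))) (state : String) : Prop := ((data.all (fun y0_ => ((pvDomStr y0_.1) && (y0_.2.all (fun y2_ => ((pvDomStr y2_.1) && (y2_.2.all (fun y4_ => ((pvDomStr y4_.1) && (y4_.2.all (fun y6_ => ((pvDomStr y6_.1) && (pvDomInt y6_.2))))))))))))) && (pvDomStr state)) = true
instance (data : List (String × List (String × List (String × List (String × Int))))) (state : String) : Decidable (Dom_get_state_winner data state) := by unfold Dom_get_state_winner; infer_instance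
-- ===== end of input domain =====

-- B drops A's incrementally-mutated votes dict and its max/count/filter winner logic:
-- it computes per-candidate totals as independent filtered sums over the flattened pair
-- stream and picks winner/ties from the totals list (objective: alternative).

-- ===== PORT A =====
-- Python's 'for county in state_results: … state_results[county] …' (and the two inner
-- dict iterations) is ported as iteration over the association pairs, which is exact for
-- the dicts Python iterates here.
def get_state_winner (data : List (String × List (String × List (String × List (String × Int))))) (state : String) : String :=
  let state_results := (PySem.Dict.mk data).getD state []
  let votes := state_results.foldl (fun votes county =>
      county.2.foldl (fun votes party =>
        party.2.foldl (fun votes cand =>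
          if votes.contains cand.1 then votes.insert cand.1 (votes.getD cand.1 0 + cand.2)
          else votes.insert cand.1 cand.2) votes) votes) PySem.Dict.empty
  -- max() over an empty dict raises ValueError: those inputs are excluded by Pre_, the
  -- "" default is never the result of an admitted input
  let winner := (PySem.List.max? votes.keys (fun c => votes.getD c 0)).getD ""
  let top := votes.getD winner 0
  if votes.values.count top > 1 then
    "Tie between " ++ PySem.Str.join ", " (votes.keys.filter (fun c => votes.getD c 0 == top))
  else winner

-- ===== PORT B =====
def get_state_winner_alt (data : List (String × List (String × List (String × List (String × Int))))) (state : String) : String :=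
  let pairs := ((PySem.Dict.mk data).getD state []).foldl (fun acc county =>
      county.2.foldl (fun acc party => acc ++ party.2) acc) []
  let order := pairs.foldl (fun (o : List String) p => if o.contains p.1 then o else o ++ [p.1]) []
  if order = [] then ""   -- 'raise ValueError': excluded by Pre_, never reached there
  else
    let totals := order.map (fun cand => ((pairs.filter (fun p => p.1 == cand)).map Prod.snd).sum)
    let top := (PySem.List.max? totals (fun x => x)).getD 0
    let tied := ((order.zip totals).filter (fun q => q.2 == top)).map Prod.fst
    if tied.length == 1 then tied.headD "" else "Tie between " ++ PySem.Str.join ", " tied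

-- ===== PRECONDITION & SPEC =====
-- Pre_ excludes exactly the inputs with no candidate entry under the given state, on which
-- A raises ValueError (max() over an empty dict) and B raises ValueError as well.
def Pre_get_state_winner (data : List (String × List (String × List (String × List (String × Int))))) (state : String) : Prop :=
  ((PySem.Dict.mk data).getD state []).flatMap (fun county => county.2.flatMap (fun party => party.2)) ≠ []
instance (data : List (String × List (String × List (String × List (String × Int))))) (state : String) : Decidable (Pre_get_state_winner data state) := by unfold Pre_get_state_winner; infer_instance
def pvWitness_get_state_winner : (List (String × List (String × List (String × List (String × Int))))) × String :=
  ([("S", [("county1", [("D", [("alice", 3), ("bob", 3)])])])], "S")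

def Spec_get_state_winner (data : List (String × List (String × List (String × List (String × Int))))) (state : String) (out : String) : Prop := out = get_state_winner_alt data state
instance (data : List (String × List (String × List (String × List (String × Int))))) (state : String) (out : String) : Decidable (Spec_get_state_winner data state out) := by unfold Spec_get_state_winner; infer_instance

-- ===== CLAIM (what is proved, stated in full; the proofs are below) =====
def Claim_equal_get_state_winner : Prop := ∀ (data : List (String × List (String × List (String × List (String × Int))))) (state : String), Dom_get_state_winner data state → Pre_get_state_winner data state → Spec_get_state_winner data state (get_state_winner data state)

-- ===== LEMMAS AND PROOFS =====

-- the flat pair stream, the first-appearance candidate order, the per-candidate total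
def pvPairs (data : List (String × List (String × List (String × List (String × Int))))) (state : String) : List (String × Int) :=
  ((PySem.Dict.mk data).getD state []).flatMap (fun county => county.2.flatMap (fun party => party.2))

def pvS (pairs : List (String × Int)) (c : String) : Int :=
  ((pairs.filter (fun p => p.1 == c)).map Prod.snd).sum

def pvOrder (pairs : List (String × Int)) : List String := PySem.Set.ofList (pairs.map Prod.fst)

def pvVotes (data : List (String × List (String × List (String × List (String × Int))))) (state : String) : PySem.Dict String Int :=
  (pvPairs data state).foldl (fun d p => d.insert p.1 (d.getD p.1 0 + p.2)) PySem.Dict.empty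

-- the two ports after the aggregation, as functions of the order list and the totals map
def pvATail (order : List String) (S : String → Int) : String :=
  let winner := (PySem.List.max? order S).getD ""
  let top := S winner
  if (order.map S).count top > 1 then
    "Tie between " ++ PySem.Str.join ", " (order.filter (fun c => S c == top))
  else winner

def pvBTail (order : List String) (S : String → Int) : String :=
  let totals := order.map S
  let top := (PySem.List.max? totals (fun x => x)).getD 0
  let tied := ((order.zip totals).filter (fun q => q.2 == top)).map Prod.fst
  if tied.length == 1 then tied.headD "" else "Tie between " ++ PySem.Str.join ", " tied

-- A's conditional update equals the uniform get-or-0 update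
lemma pv_update_eq (d : PySem.Dict String Int) (c : String) (v : Int) :
    (if d.contains c then d.insert c (d.getD c 0 + v) else d.insert c v)
      = d.insert c (d.getD c 0 + v) := by
  by_cases h : d.contains c = true
  · simp [h]
  · have h0 : d.getD c 0 = 0 := by
      have hg : d.get? c = none := by
        rw [PySem.Dict.contains_eq_isSome_get?] at h
        cases hg : d.get? c with
        | none => rfl
        | some w => rw [hg] at h; simp at h
      simp [PySem.Dict.getD, hg]
    simp [h, h0]

-- A's triple-nested aggregation builds pvVotes
lemma pv_votesA_eq (data : List (String × List (String × List (String × List (String × Int))))) (state : String) :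
    ((PySem.Dict.mk data).getD state []).foldl (fun votes county =>
        county.2.foldl (fun votes party =>
          party.2.foldl (fun votes cand =>
            if votes.contains cand.1 then votes.insert cand.1 (votes.getD cand.1 0 + cand.2)
            else votes.insert cand.1 cand.2) votes) votes) PySem.Dict.empty
      = pvVotes data state := by
  have hf : (fun (votes : PySem.Dict String Int) (cand : String × Int) =>
      if votes.contains cand.1 then votes.insert cand.1 (votes.getD cand.1 0 + cand.2)
      else votes.insert cand.1 cand.2)
      = (fun d p => d.insert p.1 (d.getD p.1 0 + p.2)) := by
    funext d p; exact pv_update_eq d p.1 p.2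
  rw [hf]
  unfold pvVotes pvPairs
  rw [List.foldl_flatMap]
  apply PySem.List.foldl_congr_mem
  intro acc county _
  rw [List.foldl_flatMap]

-- each lookup in the aggregated dict is the filtered sum over the pair stream
lemma pv_getD_fold (l : List (String × Int)) (d : PySem.Dict String Int) (c : String) :
    (l.foldl (fun d p => d.insert p.1 (d.getD p.1 0 + p.2)) d).getD c 0
      = d.getD c 0 + pvS l c := by
  induction l generalizing d with
  | nil => simp [pvS]
  | cons p t ih =>
    rw [List.foldl_cons, ih]
    by_cases h : c = p.1
    · subst h
      rw [PySem.Dict.getD_insert_self]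
      simp only [pvS, List.filter_cons, beq_self_eq_true, if_pos]
      simp
      ring
    · rw [PySem.Dict.getD_insert_of_ne _ _ _ h]
      simp only [pvS, List.filter_cons]
      rw [if_neg (by simpa using fun he => h he.symm)]

-- the aggregated dict's lookup function IS pvS (also 0 on unseen candidates)
lemma pv_getD_eq_S (data : List (String × List (String × List (String × List (String × Int))))) (state : String) :
    (fun c => (pvVotes data state).getD c 0) = pvS (pvPairs data state) := by
  funext c
  unfold pvVotes
  rw [pv_getD_fold]
  simp

-- the aggregated dict's keys are the first-appearance candidate order
lemma pv_keys_eq_order (data : List (String × List (String × List (String × List (String × Int))))) (state : String) :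
    (pvVotes data state).keys = pvOrder (pvPairs data state) := by
  unfold pvVotes pvOrder
  rw [PySem.Dict.keys_foldl_insert_key]
  rfl

lemma pv_nodup_votes (data : List (String × List (String × List (String × List (String × Int))))) (state : String) :
    (pvVotes data state).keys.Nodup := by
  unfold pvVotes
  exact PySem.Dict.nodup_keys_foldl_insert_key (pvPairs data state) Prod.fst
    (fun d a => d.getD a.1 0 + a.2) PySem.Dict.empty (by simp)

-- the two tails agree on any nonempty order list
lemma pv_tail_eq (order : List String) (S : String → Int) (hne : order ≠ []) :
    pvATail order S = pvBTail order S := by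
  obtain ⟨w, hw⟩ : ∃ w, PySem.List.max? order S = some w := by
    cases hm : PySem.List.max? order S with
    | none => exact absurd ((PySem.List.max?_eq_none_iff _ _).1 hm) hne
    | some w => exact ⟨w, rfl⟩
  have hwmem : w ∈ order := PySem.List.max?_mem hw
  have hwmax : ∀ c ∈ order, S c ≤ S w := fun c hc => PySem.List.max?_isMax hw c hc
  obtain ⟨t, ht⟩ : ∃ t, PySem.List.max? (order.map S) (fun x => x) = some t := by
    cases hm : PySem.List.max? (order.map S) (fun x => x) with
    | none =>
      have := (PySem.List.max?_eq_none_iff _ _).1 hm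
      exact absurd (List.map_eq_nil_iff.1 this) hne
    | some t => exact ⟨t, rfl⟩
  have htw : t = S w := by
    obtain ⟨c0, hc0, rfl⟩ := List.mem_map.1 (PySem.List.max?_mem ht)
    have h1 : S c0 ≤ S w := hwmax c0 hc0
    have h2 : S w ≤ S c0 := PySem.List.max?_isMax ht (S w) (List.mem_map_of_mem hwmem)
    omega
  have hzip : order.zip (order.map S) = order.map (fun c => (c, S c)) := by
    have h := List.zip_map' (f := id) (g := S) (l := order)
    simpa using h
  have htied : ((order.map (fun c => (c, S c))).filter (fun q => q.2 == S w)).map Prod.fst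
      = order.filter (fun c => S c == S w) := by
    rw [List.filter_map, List.map_map]
    simp [Function.comp_def]
  have hcount : (order.map S).count (S w) = (order.filter (fun c => S c == S w)).length := by
    rw [List.count_eq_countP, List.countP_map, List.countP_eq_length_filter]
    rfl
  have hwin : w ∈ order.filter (fun c => S c == S w) := List.mem_filter.2 ⟨hwmem, by simp⟩
  unfold pvATail pvBTail
  simp only [hw, ht, Option.getD_some, htw, hzip, htied, hcount]
  by_cases hL : (order.filter (fun c => S c == S w)).length = 1
  · obtain ⟨x, hx⟩ := List.length_eq_one_iff.1 hL
    have hwx : w = x := by rw [hx] at hwin; simpa using hwin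
    have hx' : order.filter (fun c => S c == S w) = [w] := by rw [hx, hwx]
    simp only [hx']
    simp
  · have h1 : 1 ≤ (order.filter (fun c => S c == S w)).length :=
      List.length_pos_of_mem hwin
    rw [if_pos (by omega), if_neg (by simpa using hL)]

-- the flattened pair stream is nonempty whenever Pre_ holds
lemma pv_order_ne (pairs : List (String × Int)) (h : pairs ≠ []) : pvOrder pairs ≠ [] := by
  obtain ⟨p, t, rfl⟩ := List.exists_cons_of_ne_nil h
  intro hnil
  have : p.1 ∈ pvOrder ((p :: t)) := by
    unfold pvOrder
    rw [PySem.Set.mem_ofList]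
    exact List.mem_map_of_mem (List.mem_cons_self ..)
  rw [hnil] at this
  simp at this

-- the flattening loop of B builds pvPairs
lemma pv_pairsB_eq (data : List (String × List (String × List (String × List (String × Int))))) (state : String) :
    ((PySem.Dict.mk data).getD state []).foldl (fun acc county =>
        county.2.foldl (fun (acc : List (String × Int)) party => acc ++ party.2) acc) []
      = pvPairs data state := by
  unfold pvPairs
  have h1 : ∀ (acc : List (String × Int)) (county : String × List (String × List (String × Int))),
      county.2.foldl (fun (acc : List (String × Int)) party => acc ++ party.2) acc
        = acc ++ county.2.flatMap (fun party => party.2) := by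
    intro acc county
    rw [PySem.List.foldl_append_eq_flatMap]
  refine Eq.trans (PySem.List.foldl_congr_mem _ _ _ _ (fun acc x _ => h1 acc x)) ?_
  rw [PySem.List.foldl_append_eq_flatMap, List.nil_append]

-- the first-appearance loop of B builds pvOrder
lemma pv_orderB_eq (pairs : List (String × Int)) :
    pairs.foldl (fun (o : List String) p => if o.contains p.1 then o else o ++ [p.1]) []
      = pvOrder pairs := by
  unfold pvOrder
  rw [PySem.Set.ofList_eq_foldl, List.foldl_map]
  rfl

-- ===== VERDICT (by name: the statement is the Claim_ definition above) =====
theorem get_state_winner_spec : Claim_equal_get_state_winner := by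
  intro data state _hdom hpre
  unfold Spec_get_state_winner
  have hpairs : pvPairs data state ≠ [] := hpre
  have hordne : pvOrder (pvPairs data state) ≠ [] := pv_order_ne _ hpairs
  have hA : get_state_winner data state
      = pvATail (pvVotes data state).keys (fun c => (pvVotes data state).getD c 0) := by
    simp only [get_state_winner, pvATail, pv_votesA_eq]
    rw [PySem.Dict.values_eq_map_keys _ (pv_nodup_votes data state) 0]
  have hB : get_state_winner_alt data state
      = if pvOrder (pvPairs data state) = [] then ""
        else pvBTail (pvOrder (pvPairs data state)) (pvS (pvPairs data state)) := by
    simp only [get_state_winner_alt, pvBTail, pv_pairsB_eq, pv_orderB_eq]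
    rfl
  rw [hA, hB, if_neg hordne, pv_keys_eq_order, pv_getD_eq_S, pv_tail_eq _ _ hordne]
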